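-- pv_equiv track=rewrite | github.com/krishkavya/Python-ifed-challenge | nearest_square.py | nearest_square
-- ===== SOURCE A (Python) =====
-- def nearest_square(limit):
--     if limit < 0:
--         return 0
--
--     while limit > 3:
--         i = 2
--         while i <= limit//2:
--             square = i*i
--             if square == limit:
--                 return square
--             else:
--                 i += 1
--         limit -= 1
--     return 1
-- ===== SOURCE B (Python) =====
-- def nearest_square(limit):
--     if limit < 0:
--         return 0
--     result = 1
--     i = 2
--     while i * i <= limit:
--         result = i * i
--         i += 1
--     return result
-- ===== Notes on version B (the rewrite author's own statement) =====
-- stated objective: faster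
-- what changed: Replaces A's top-down decrement loop with a quadratic trial search per candidate by a single bottom-up scan of squares i*i <= limit keeping the last one.
import Mathlib
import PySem

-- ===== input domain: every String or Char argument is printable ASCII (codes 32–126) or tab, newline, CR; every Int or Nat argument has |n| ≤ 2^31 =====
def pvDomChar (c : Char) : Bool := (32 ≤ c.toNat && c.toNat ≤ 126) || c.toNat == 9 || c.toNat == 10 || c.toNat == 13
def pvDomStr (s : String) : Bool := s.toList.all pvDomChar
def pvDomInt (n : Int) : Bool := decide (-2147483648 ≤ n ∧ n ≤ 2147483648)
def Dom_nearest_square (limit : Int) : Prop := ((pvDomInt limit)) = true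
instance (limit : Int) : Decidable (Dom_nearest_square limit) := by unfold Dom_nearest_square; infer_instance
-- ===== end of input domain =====

-- B replaces A's top-down decrement-and-trial-division search by a single bottom-up
-- scan of squares, an asymptotically faster algorithm with the same return value.


-- ===== PORT A =====
-- inner 'while i <= limit//2' loop of A: returns some square on 'return square', none on exit
def innerA (limit i : Int) : Option Int :=
  if i ≤ PySem.Int.floordiv limit 2 then
    if i * i = limit then some (i * i)
    else innerA limit (i + 1)
  else none
termination_by (PySem.Int.floordiv limit 2 + 1 - i).toNat
decreasing_by omega

-- outer 'while limit > 3' loop of A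
def outerA (limit : Int) : Int :=
  if 3 < limit then
    match innerA limit 2 with
    | some s => s
    | none => outerA (limit - 1)
  else 1
termination_by limit.toNat
decreasing_by omega

def nearest_square (limit : Int) : Int :=
  if limit < 0 then 0 else outerA limit

-- ===== PORT B =====
-- B's 'while i*i <= limit' loop carrying (i, result)
def loopB (limit i result : Int) : Int :=
  if i * i ≤ limit then loopB limit (i + 1) (i * i) else result
termination_by (limit + 1 - i).toNat
decreasing_by
  have : i ≤ limit := by nlinarith [mul_self_nonneg i]
  omega

def nearest_square_alt (limit : Int) : Int :=
  if limit < 0 then 0 else loopB limit 2 1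

-- ===== PRECONDITION & SPEC =====
def Spec_nearest_square (limit : Int) (out : Int) : Prop := out = nearest_square_alt limit
instance (limit : Int) (out : Int) : Decidable (Spec_nearest_square limit out) := by unfold Spec_nearest_square; infer_instance

-- ===== CLAIM (what is proved, stated in full; the proofs are below) =====
def Claim_equal_nearest_square : Prop := ∀ (limit : Int), Dom_nearest_square limit → Spec_nearest_square limit (nearest_square limit)

-- ===== LEMMAS AND PROOFS =====

lemma int_sqrt_le (n : Int) (h : 0 ≤ n) : Int.sqrt n * Int.sqrt n ≤ n := by
  have h1 : ((Nat.sqrt n.toNat : Int)) * (Nat.sqrt n.toNat : Int) ≤ (n.toNat : Int) := by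
    have := Nat.sqrt_le' n.toNat
    rw [pow_two] at this
    exact_mod_cast this
  rw [Int.toNat_of_nonneg h] at h1
  exact h1

lemma int_lt_succ_sqrt (n : Int) (h : 0 ≤ n) : n < (Int.sqrt n + 1) * (Int.sqrt n + 1) := by
  have h1 : (n.toNat : Int) < ((Nat.sqrt n.toNat : Int) + 1) * ((Nat.sqrt n.toNat : Int) + 1) := by
    have := Nat.lt_succ_sqrt' n.toNat
    rw [Nat.succ_eq_add_one, pow_two] at this
    exact_mod_cast this
  rw [Int.toNat_of_nonneg h] at h1
  exact h1

lemma int_sqrt_unique (n r : Int) (h0 : 0 ≤ r) (h1 : r * r ≤ n) (h2 : n < (r + 1) * (r + 1)) :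
    Int.sqrt n = r := by
  have hn : 0 ≤ n := le_trans (mul_self_nonneg r) h1
  have hs0 := Int.sqrt_nonneg n
  have hs1 := int_sqrt_le n hn
  have hs2 := int_lt_succ_sqrt n hn
  rcases lt_trichotomy (Int.sqrt n) r with h | h | h
  · exfalso; nlinarith
  · exact h
  · exfalso; nlinarith

-- B's loop computes (Int.sqrt limit)^2, given the invariant result = (i-1)^2 ≤ limit
lemma loopB_spec (n : Nat) (limit i result : Int)
    (hn : (limit + 1 - i).toNat = n) (h2 : 2 ≤ i)
    (hres : result = (i - 1) * (i - 1)) (hle : (i - 1) * (i - 1) ≤ limit) :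
    loopB limit i result = Int.sqrt limit * Int.sqrt limit := by
  induction n using Nat.strong_induction_on generalizing i result with
  | _ n ih =>
    rw [loopB]
    split
    · rename_i hguard
      have hi : i ≤ limit := by nlinarith
      exact ih (limit + 1 - (i + 1)).toNat (by omega) (i + 1) (i * i) rfl (by omega)
        (by ring_nf) (by simpa using hguard)
    · rename_i hguard
      have : Int.sqrt limit = i - 1 := int_sqrt_unique limit (i - 1) (by omega) hle
        (by have := lt_of_not_ge hguard; nlinarith)
      rw [this, hres]

lemma loopB_small (limit : Int) (h0 : 0 ≤ limit) (h3 : limit ≤ 3) : loopB limit 2 1 = 1 := by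
  rw [loopB, if_neg (by omega : ¬((2:Int) * 2 ≤ limit))]

-- A's inner search finds the root j of limit when one is ≥ i (it then lies ≤ limit//2)
lemma innerA_some (n : Nat) (limit i j : Int)
    (hn : (j - i).toNat = n) (h2 : 2 ≤ i) (hij : i ≤ j) (hsq : j * j = limit) :
    innerA limit i = some limit := by
  induction n using Nat.strong_induction_on generalizing i with
  | _ n ih =>
    have hj2 : (2:Int) ≤ j := le_trans h2 hij
    have hjfd : j ≤ PySem.Int.floordiv limit 2 :=
      (PySem.Int.le_floordiv_iff_mul_le (by norm_num)).mpr (by nlinarith)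
    rw [innerA, if_pos (le_trans hij hjfd)]
    by_cases hi : i * i = limit
    · rw [if_pos hi, hi]
    · have hilt : i < j := by
        rcases eq_or_lt_of_le hij with h | h
        · exact absurd (h ▸ hsq) hi
        · exact h
      rw [if_neg hi]
      exact ih (j - (i + 1)).toNat (by omega) (i + 1) rfl (by omega) (by omega)

-- and returns none when no root ≥ i exists
lemma innerA_none (n : Nat) (limit i : Int)
    (hn : (PySem.Int.floordiv limit 2 + 1 - i).toNat = n) (h2 : 2 ≤ i) (h0 : 0 ≤ limit)  -- h0 kept for statement symmetry
    (hex : ¬ ∃ j, i ≤ j ∧ j * j = limit) :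
    innerA limit i = none := by
  induction n using Nat.strong_induction_on generalizing i with
  | _ n ih =>
    rw [innerA]
    split
    · rename_i hguard
      rw [if_neg (fun h => hex ⟨i, le_refl i, h⟩)]
      exact ih (PySem.Int.floordiv limit 2 + 1 - (i + 1)).toNat (by omega) (i + 1) rfl (by omega)
        (fun ⟨j, hj1, hj2⟩ => hex ⟨j, by omega, hj2⟩)
    · rfl

-- A's outer loop also computes (Int.sqrt limit)^2 for limit ≥ 4, else 1
lemma outerA_spec (n : Nat) (limit : Int) (hn : limit.toNat = n) (h0 : 0 ≤ limit) :
    outerA limit = if 4 ≤ limit then Int.sqrt limit * Int.sqrt limit else 1 := by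
  induction n using Nat.strong_induction_on generalizing limit with
  | _ n ih =>
    rw [outerA]
    split
    · rename_i hgt
      have h4 : 4 ≤ limit := by omega
      by_cases hex : ∃ j, (2:Int) ≤ j ∧ j * j = limit
      · obtain ⟨j, hj2, hjsq⟩ := hex
        rw [innerA_some (j - 2).toNat limit 2 j rfl (le_refl 2) hj2 hjsq]
        have hsj : Int.sqrt limit = j := int_sqrt_unique limit j (by omega) (le_of_eq hjsq)
          (by nlinarith)
        rw [if_pos h4, hsj, hjsq]
      · rw [innerA_none (PySem.Int.floordiv limit 2 + 1 - 2).toNat limit 2 rfl (le_refl 2)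
          (by omega) hex]
        have hlim5 : 5 ≤ limit := by
          rcases eq_or_lt_of_le h4 with h | h
          · exact absurd ⟨2, le_refl 2, by rw [← h]; norm_num⟩ hex
          · omega
        rw [ih (limit - 1).toNat (by omega) (limit - 1) rfl (by omega),
          if_pos (by omega : (4:Int) ≤ limit - 1)]
        have hs0 := Int.sqrt_nonneg limit
        have hs1 := int_sqrt_le limit (by omega)
        have hs2 := int_lt_succ_sqrt limit (by omega)
        have hsge2 : 2 ≤ Int.sqrt limit := by nlinarith
        have hne : Int.sqrt limit * Int.sqrt limit ≠ limit := fun h =>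
          hex ⟨Int.sqrt limit, hsge2, h⟩
        have heq : Int.sqrt (limit - 1) = Int.sqrt limit :=
          int_sqrt_unique (limit - 1) (Int.sqrt limit) hs0 (by omega) (by omega)
        rw [if_pos h4, heq]
    · rw [if_neg (by omega)]

-- ===== VERDICT (by name: the statement is the Claim_ definition above) =====
theorem nearest_square_spec : Claim_equal_nearest_square := by
  intro limit _
  unfold Spec_nearest_square nearest_square nearest_square_alt
  split
  · rfl
  · rename_i hneg
    have h0 : 0 ≤ limit := by omega
    rw [outerA_spec limit.toNat limit rfl h0]
    by_cases h4 : 4 ≤ limit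
    · rw [if_pos h4]
      exact (loopB_spec (limit + 1 - 2).toNat limit 2 1 rfl (by norm_num) (by norm_num) (by omega)).symm
    · rw [if_neg h4, loopB_small limit h0 (by omega)]
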